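-- pv_equiv track=rewrite | github.com/ponktacology/wdi | kolos2a.py | fourth_compatibility
-- ===== SOURCE A (Python) =====
-- def fourth_compatibility(a, b):
--    digits = [-1] * 4
--
--    while a > 0:
--        digits[a % 4] = 1
--        a //= 4
--
--    while b > 0:
--        if digits[b % 4] < 0:
--            return False
--        digits[b % 4] = 0
--        b //= 4
--    for i in digits:
--         if i == 1:
--             return False
--
--    return True
-- ===== SOURCE B (Python) =====
-- def fourth_compatibility(a, b):
--     # Loop-free: the base-4 digits of n are the 2-bit chunks of n's binary form.
--     # profile(n) says, for each digit value 0..3, whether it occurs in n.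
--     def profile(n):
--         if n <= 0:
--             return (False, False, False, False)
--         k = (n.bit_length() + 1) // 2   # number of base-4 digits of n
--         M = (4 ** k - 1) // 3           # comb 0b0101..01: the low bit of each chunk
--         lo = n & M                      # low bits of all chunks
--         hi = (n >> 1) & M               # high bits of all chunks
--         return (M ^ (lo | hi) != 0,     # some chunk is 00
--                 lo & (M ^ hi) != 0,     # some chunk is 01
--                 hi & (M ^ lo) != 0,     # some chunk is 10
--                 lo & hi != 0)           # some chunk is 11
--     return profile(a) == profile(b)
-- ===== Notes on version B (the rewrite author's own statement) =====
-- stated objective: alternative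
-- what changed: Replaces A's digit-peeling loops over a shared tri-state [-1/1/0] array (mark, then erase with early exits) by a loop-free bit-parallel (SWAR) computation: base-4 digits are the 2-bit chunks of the binary form, so each digit value's presence is one whole-number mask expression; B compares the two 4-tuples of presence flags.
import Mathlib
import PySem

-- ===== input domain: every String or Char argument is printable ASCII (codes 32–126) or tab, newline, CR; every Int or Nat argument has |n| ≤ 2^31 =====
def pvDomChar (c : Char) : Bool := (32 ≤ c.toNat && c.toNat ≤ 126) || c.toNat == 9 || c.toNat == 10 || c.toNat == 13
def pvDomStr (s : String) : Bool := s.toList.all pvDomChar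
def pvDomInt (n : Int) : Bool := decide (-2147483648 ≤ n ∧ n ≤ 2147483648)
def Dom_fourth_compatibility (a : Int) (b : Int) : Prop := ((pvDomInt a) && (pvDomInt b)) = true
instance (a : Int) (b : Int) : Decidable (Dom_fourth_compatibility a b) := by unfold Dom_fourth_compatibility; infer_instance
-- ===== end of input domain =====

-- B replaces A's digit-peeling loops over a shared tri-state [-1/1/0] array by a loop-free
-- bit-parallel (SWAR) computation: base-4 digits are the 2-bit chunks of the binary form, so each
-- digit value's presence is one whole-number mask expression (objective: alternative algorithm).

-- ===== PORT A =====
-- termination helper for the while-loops: a //= 4 strictly shrinks a positive a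
theorem fcA_div4_lt (n : Int) (h : 0 < n) :
    (PySem.Int.floordiv n 4).toNat < n.toNat := by
  rw [PySem.Int.floordiv_eq_ediv_of_pos (by norm_num : (0:Int) < 4)]
  omega

-- `while a > 0: digits[a % 4] = 1; a //= 4`  (index a % 4 is in [0,4), so pySetD is exact)
def fcA_markLoop (a : Int) (digits : List Int) : List Int :=
  if h : 0 < a then
    fcA_markLoop (PySem.Int.floordiv a 4) (PySem.List.pySetD digits (PySem.Int.mod a 4) 1)
  else digits
termination_by a.toNat
decreasing_by exact fcA_div4_lt a h

-- `while b > 0: if digits[b % 4] < 0: return False; digits[b % 4] = 0; b //= 4`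
-- none = the early `return False`; index b % 4 is in [0,4), so pyGetD/pySetD are exact
def fcA_checkLoop (b : Int) (digits : List Int) : Option (List Int) :=
  if h : 0 < b then
    if PySem.List.pyGetD digits (PySem.Int.mod b 4) 0 < 0 then none
    else fcA_checkLoop (PySem.Int.floordiv b 4) (PySem.List.pySetD digits (PySem.Int.mod b 4) 0)
  else some digits
termination_by b.toNat
decreasing_by exact fcA_div4_lt b h

def fourth_compatibility (a : Int) (b : Int) : Bool :=
  match fcA_checkLoop b (fcA_markLoop a [-1, -1, -1, -1]) with
  | none => false
  | some digits => !digits.any (fun i => i == 1)   -- `for i in digits: if i == 1: return False`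

-- ===== PORT B =====
-- body of Source B's `profile` after the `n <= 0` guard: n > 0, so Python's arbitrary-precision int
-- arithmetic/bitwise ops are exact on Nat (n >> 1 is n >>> 1, n & M is &&&, 4**k - 1 and //3 stay
-- in Nat since 4^k ≥ 4); n.bit_length() is PySem.Int.bitLength (Python-exact)
def fcB_profilePos (m : Nat) : Bool × Bool × Bool × Bool :=
  let k := (PySem.Int.bitLength (m : Int) + 1) / 2   -- number of base-4 digits of m
  let M := (4 ^ k - 1) / 3                           -- comb 0b0101..01: low bit of each chunk
  let lo := m &&& M                                  -- low bits of all chunks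
  let hi := (m >>> 1) &&& M                          -- high bits of all chunks
  (decide (M ^^^ (lo ||| hi) ≠ 0),                   -- some chunk is 00
   decide (lo &&& (M ^^^ hi) ≠ 0),                   -- some chunk is 01
   decide (hi &&& (M ^^^ lo) ≠ 0),                   -- some chunk is 10
   decide (lo &&& hi ≠ 0))                           -- some chunk is 11

def fcB_profile (n : Int) : Bool × Bool × Bool × Bool :=
  if n ≤ 0 then (false, false, false, false) else fcB_profilePos n.toNat

def fourth_compatibility_alt (a : Int) (b : Int) : Bool :=
  decide (fcB_profile a = fcB_profile b)   -- Python tuple `==` is structural equality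

-- ===== PRECONDITION & SPEC =====
def Spec_fourth_compatibility (a : Int) (b : Int) (out : Bool) : Prop := out = fourth_compatibility_alt a b
instance (a : Int) (b : Int) (out : Bool) : Decidable (Spec_fourth_compatibility a b out) := by unfold Spec_fourth_compatibility; infer_instance

-- ===== CLAIM (what is proved, stated in full; the proofs are below) =====
def Claim_equal_fourth_compatibility : Prop := ∀ (a : Int) (b : Int), Dom_fourth_compatibility a b → Spec_fourth_compatibility a b (fourth_compatibility a b)

-- ===== LEMMAS AND PROOFS =====

-- proof-only reference value: the set of base-4 digits of n as a 4-bit mask, by digit peeling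
def fcS_dmask (n : Int) (m : Nat) : Nat :=
  if h : 0 < n then
    fcS_dmask (PySem.Int.floordiv n 4) (m ||| (1 <<< (PySem.Int.mod n 4).toNat))
  else m
termination_by n.toNat
decreasing_by exact fcA_div4_lt n h

-- induction along the common loop shape `while n > 0: … n //= 4`
theorem fc_int_ind (P : Int → Prop) (base : ∀ n : Int, n ≤ 0 → P n)
    (step : ∀ n : Int, 0 < n → P (PySem.Int.floordiv n 4) → P n) (n : Int) : P n := by
  by_cases h : 0 < n
  · exact step n h (fc_int_ind P base step _)
  · exact base n (by omega)
termination_by n.toNat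
decreasing_by exact fcA_div4_lt n h

theorem fcS_dmask_nonpos (n : Int) (m : Nat) (h : n ≤ 0) : fcS_dmask n m = m := by
  rw [fcS_dmask]; simp [show ¬ 0 < n by omega]

theorem fcS_dmask_pos (n : Int) (m : Nat) (h : 0 < n) :
    fcS_dmask n m
      = fcS_dmask (PySem.Int.floordiv n 4) (m ||| (1 <<< (PySem.Int.mod n 4).toNat)) := by
  rw [fcS_dmask]; simp [h]

theorem fcS_dmask_acc (n : Int) :
    ∀ m m' : Nat, fcS_dmask n (m ||| m') = fcS_dmask n m ||| m' := by
  induction n using fc_int_ind with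
  | base n h => intro m m'; rw [fcS_dmask_nonpos _ _ h, fcS_dmask_nonpos _ _ h]
  | step n h ih =>
    intro m m'
    rw [fcS_dmask_pos n (m ||| m') h, fcS_dmask_pos n m h]
    have : m ||| m' ||| (1 <<< (PySem.Int.mod n 4).toNat)
         = (m ||| (1 <<< (PySem.Int.mod n 4).toNat)) ||| m' := by
      rw [Nat.or_assoc, Nat.or_assoc, Nat.or_comm m' _]
    rw [this, ih]

theorem fcS_dmask_step (n : Int) (h : 0 < n) :
    fcS_dmask n 0
      = fcS_dmask (PySem.Int.floordiv n 4) 0 ||| (1 <<< (PySem.Int.mod n 4).toNat) := by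
  rw [fcS_dmask_pos n 0 h, fcS_dmask_acc _ 0 _]

theorem fcS_dmask_lt (n : Int) : fcS_dmask n 0 < 16 := by
  induction n using fc_int_ind with
  | base n h => rw [fcS_dmask_nonpos _ _ h]; omega
  | step n h ih =>
    rw [fcS_dmask_step _ h]
    have hr : (PySem.Int.mod n 4).toNat < 4 := by
      have := PySem.Int.mod_lt n (b := 4) (by norm_num)
      have := PySem.Int.mod_nonneg n (b := 4) (by norm_num)
      omega
    have h2 : (1 <<< (PySem.Int.mod n 4).toNat) < 16 := by
      interval_cases h' : (PySem.Int.mod n 4).toNat <;> decide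
    calc fcS_dmask (PySem.Int.floordiv n 4) 0 ||| (1 <<< (PySem.Int.mod n 4).toNat) < 2 ^ 4 :=
          Nat.or_lt_two_pow ih h2
      _ = 16 := rfl

-- digit case analysis: for 0 < n, (n % 4).toNat ∈ {0,1,2,3} and n % 4 = ↑that
theorem fc_mod4_cases (n : Int) (h : 0 < n) :
    (PySem.Int.mod n 4).toNat < 4 ∧ PySem.Int.mod n 4 = ((PySem.Int.mod n 4).toNat : Int) := by
  have h1 := PySem.Int.mod_lt n (b := 4) (by norm_num)
  have h2 := PySem.Int.mod_nonneg n (b := 4) (by norm_num)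
  omega

theorem fcA_markLoop_nonpos (a : Int) (digits : List Int) (h : a ≤ 0) : fcA_markLoop a digits = digits := by
  rw [fcA_markLoop]; simp [show ¬ 0 < a by omega]

theorem fcA_markLoop_pos (a : Int) (digits : List Int) (h : 0 < a) :
    fcA_markLoop a digits = fcA_markLoop (PySem.Int.floordiv a 4) (PySem.List.pySetD digits (PySem.Int.mod a 4) 1) := by
  rw [fcA_markLoop]; simp [h]

theorem fcA_checkLoop_nonpos (b : Int) (digits : List Int) (h : b ≤ 0) : fcA_checkLoop b digits = some digits := by
  rw [fcA_checkLoop]; simp [show ¬ 0 < b by omega]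

theorem fcA_checkLoop_pos (b : Int) (digits : List Int) (h : 0 < b) :
    fcA_checkLoop b digits =
      if PySem.List.pyGetD digits (PySem.Int.mod b 4) 0 < 0 then none
      else fcA_checkLoop (PySem.Int.floordiv b 4) (PySem.List.pySetD digits (PySem.Int.mod b 4) 0) := by
  rw [fcA_checkLoop]; simp [h]

-- the marking loop writes 1 exactly at the digit positions recorded in the reference mask
theorem fcA_markLoop_eq (a : Int) :
    ∀ w x y z : Int, fcA_markLoop a [w, x, y, z] =
      [if (fcS_dmask a 0).testBit 0 then 1 else w,
       if (fcS_dmask a 0).testBit 1 then 1 else x,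
       if (fcS_dmask a 0).testBit 2 then 1 else y,
       if (fcS_dmask a 0).testBit 3 then 1 else z] := by
  induction a using fc_int_ind with
  | base a h =>
    intro w x y z
    rw [fcA_markLoop_nonpos _ _ h, fcS_dmask_nonpos _ _ h]
    simp
  | step a h ih =>
    intro w x y z
    obtain ⟨hr, hmod⟩ := fc_mod4_cases a h
    rw [fcA_markLoop_pos _ _ h, hmod, PySem.List.pySetD_natCast]
    have hbit : ∀ d, (fcS_dmask a 0).testBit d
        = ((fcS_dmask (PySem.Int.floordiv a 4) 0).testBit d
            || decide ((PySem.Int.mod a 4).toNat = d)) := by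
      intro d
      rw [fcS_dmask_step a h, Nat.testBit_or,
          show (1:Nat) <<< (PySem.Int.mod a 4).toNat = 2 ^ (PySem.Int.mod a 4).toNat by
            simp [Nat.shiftLeft_eq],
          Nat.testBit_two_pow]
    simp only [hbit]
    generalize (PySem.Int.mod a 4).toNat = r at hr ⊢
    interval_cases r <;> simp only [List.set] <;> rw [ih] <;> simp

-- the checking loop: None iff some digit of b sits on a negative cell, else zero those cells
theorem fcA_checkLoop_eq (b : Int) :
    ∀ w x y z : Int, fcA_checkLoop b [w, x, y, z] =
      if ((fcS_dmask b 0).testBit 0 ∧ w < 0) ∨ ((fcS_dmask b 0).testBit 1 ∧ x < 0)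
         ∨ ((fcS_dmask b 0).testBit 2 ∧ y < 0) ∨ ((fcS_dmask b 0).testBit 3 ∧ z < 0)
      then none
      else some
        [if (fcS_dmask b 0).testBit 0 then 0 else w,
         if (fcS_dmask b 0).testBit 1 then 0 else x,
         if (fcS_dmask b 0).testBit 2 then 0 else y,
         if (fcS_dmask b 0).testBit 3 then 0 else z] := by
  induction b using fc_int_ind with
  | base b h =>
    intro w x y z
    rw [fcA_checkLoop_nonpos _ _ h, fcS_dmask_nonpos _ _ h]
    simp
  | step b h ih =>
    intro w x y z
    obtain ⟨hr, hmod⟩ := fc_mod4_cases b h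
    rw [fcA_checkLoop_pos _ _ h, hmod, PySem.List.pySetD_natCast]
    have hbit : ∀ d, (fcS_dmask b 0).testBit d
        = ((fcS_dmask (PySem.Int.floordiv b 4) 0).testBit d
            || decide ((PySem.Int.mod b 4).toNat = d)) := by
      intro d
      rw [fcS_dmask_step b h, Nat.testBit_or,
          show (1:Nat) <<< (PySem.Int.mod b 4).toNat = 2 ^ (PySem.Int.mod b 4).toNat by
            simp [Nat.shiftLeft_eq],
          Nat.testBit_two_pow]
    simp only [hbit, PySem.List.pyGetD_natCast]
    generalize (PySem.Int.mod b 4).toNat = r at hr ⊢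
    interval_cases r <;>
      simp only [List.set, List.getD, List.getElem?_cons_zero, List.getElem?_cons_succ,
        Option.getD_some]
    · by_cases hneg : w < 0
      · rw [if_pos hneg, if_pos (by simp [hneg])]
      · rw [if_neg hneg, ih]; simp [hneg]
    · by_cases hneg : x < 0
      · rw [if_pos hneg, if_pos (by simp [hneg])]
      · rw [if_neg hneg, ih]; simp [hneg]
    · by_cases hneg : y < 0
      · rw [if_pos hneg, if_pos (by simp [hneg])]
      · rw [if_neg hneg, ih]; simp [hneg]
    · by_cases hneg : z < 0
      · rw [if_pos hneg, if_pos (by simp [hneg])]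
      · rw [if_neg hneg, ih]; simp [hneg]

-- ---- B side ----

-- Nat version of the reference mask, aligned with fcB_profilePos's domain
def fcN_dmask (m : Nat) : Nat :=
  if h : 0 < m then fcN_dmask (m / 4) ||| (1 <<< (m % 4)) else 0
termination_by m
decreasing_by exact Nat.div_lt_self h (by norm_num)

theorem fcN_dmask_zero : fcN_dmask 0 = 0 := by rw [fcN_dmask]; simp

theorem fcN_dmask_pos (m : Nat) (h : 0 < m) :
    fcN_dmask m = fcN_dmask (m / 4) ||| (1 <<< (m % 4)) := by
  rw [fcN_dmask]; simp [h]

-- bridge: the Int peeling mask is the Nat peeling mask of n.toNat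
theorem fcS_dmask_toNat (n : Int) : fcS_dmask n 0 = fcN_dmask n.toNat := by
  induction n using fc_int_ind with
  | base n h =>
    rw [fcS_dmask_nonpos _ _ h, show n.toNat = 0 by omega, fcN_dmask_zero]
  | step n h ih =>
    rw [fcS_dmask_step _ h, ih, fcN_dmask_pos n.toNat (by omega)]
    have hd : (PySem.Int.floordiv n 4).toNat = n.toNat / 4 := by
      rw [PySem.Int.floordiv_eq_ediv_of_pos (by norm_num : (0:Int) < 4)]; omega
    have hm : (PySem.Int.mod n 4).toNat = n.toNat % 4 := by
      rw [PySem.Int.mod_eq_emod_of_pos (by norm_num : (0:Int) < 4)]; omega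
    rw [hd, hm]

theorem fcN_dmask_lt (m : Nat) : fcN_dmask m < 16 := by
  have := fcS_dmask_toNat (m : Int)
  simp at this
  rw [← this]; exact fcS_dmask_lt _

-- chunk decomposition of the bitwise operations: low 2 bits vs the rest
theorem fc_chunk_land (a b c d : Nat) (hb : b < 4) (hd : d < 4) :
    (4 * a + b) &&& (4 * c + d) = 4 * (a &&& c) + (b &&& d) := by
  apply Nat.eq_of_testBit_eq
  intro j
  rw [show (4:Nat) = 2^2 from rfl] at *
  rw [Nat.testBit_and,
      Nat.testBit_two_pow_mul_add a hb j,
      Nat.testBit_two_pow_mul_add c hd j,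
      Nat.testBit_two_pow_mul_add (a &&& c) (lt_of_le_of_lt Nat.and_le_left hb) j]
  split_ifs <;> simp [Nat.testBit_and]

theorem fc_chunk_lor (a b c d : Nat) (hb : b < 4) (hd : d < 4) :
    (4 * a + b) ||| (4 * c + d) = 4 * (a ||| c) + (b ||| d) := by
  apply Nat.eq_of_testBit_eq
  intro j
  rw [show (4:Nat) = 2^2 from rfl] at *
  rw [Nat.testBit_or,
      Nat.testBit_two_pow_mul_add a hb j,
      Nat.testBit_two_pow_mul_add c hd j,
      Nat.testBit_two_pow_mul_add (a ||| c) (Nat.or_lt_two_pow hb hd) j]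
  split_ifs <;> simp [Nat.testBit_or]

theorem fc_chunk_xor (a b c d : Nat) (hb : b < 4) (hd : d < 4) :
    (4 * a + b) ^^^ (4 * c + d) = 4 * (a ^^^ c) + (b ^^^ d) := by
  apply Nat.eq_of_testBit_eq
  intro j
  rw [show (4:Nat) = 2^2 from rfl] at *
  rw [Nat.testBit_xor,
      Nat.testBit_two_pow_mul_add a hb j,
      Nat.testBit_two_pow_mul_add c hd j,
      Nat.testBit_two_pow_mul_add (a ^^^ c) (Nat.xor_lt_two_pow hb hd) j]
  split_ifs <;> simp [Nat.testBit_xor]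

theorem fc_ne_zero_chunk (x y : Nat) :
    decide (4 * x + y ≠ 0) = (decide (x ≠ 0) || decide (y ≠ 0)) := by
  by_cases hx : x = 0 <;> by_cases hy : y = 0 <;> simp [hx, hy]

-- bit_length recurrence over one base-4 digit
theorem fc_bitLength_quarter (m : Nat) (h : 0 < m / 4) :
    PySem.Int.bitLength (m : Int) = PySem.Int.bitLength ((m / 4 : Nat) : Int) + 2 := by
  rw [PySem.Int.bitLength_natCast (by omega : 0 < m),
      PySem.Int.bitLength_natCast (by omega : 0 < m / 2),
      Nat.div_div_eq_div_mul]

-- the comb mask recurrence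
theorem fc_comb_succ (k : Nat) : (4 ^ (k + 1) - 1) / 3 = 4 * ((4 ^ k - 1) / 3) + 1 := by
  have h1 : 4 ^ k % 3 = 1 := by
    rw [Nat.pow_mod]; simp
  have h2 : 1 ≤ 4 ^ k := Nat.one_le_pow _ _ (by norm_num)
  have h3 : 4 ^ (k + 1) = 4 * 4 ^ k := by ring
  omega

-- the SWAR profile computes exactly the four bits of the peeled digit mask
theorem fcB_profilePos_eq (m : Nat) (h : 0 < m) :
    fcB_profilePos m = ((fcN_dmask m).testBit 0, (fcN_dmask m).testBit 1,
                        (fcN_dmask m).testBit 2, (fcN_dmask m).testBit 3) := by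
  by_cases hq : m / 4 = 0
  · have hm4 : m < 4 := by omega
    interval_cases m
    · rw [fcN_dmask_pos _ (by norm_num), show (1:Nat)/4 = 0 from rfl, fcN_dmask_zero]; decide
    · rw [fcN_dmask_pos _ (by norm_num), show (2:Nat)/4 = 0 from rfl, fcN_dmask_zero]; decide
    · rw [fcN_dmask_pos _ (by norm_num), show (3:Nat)/4 = 0 from rfl, fcN_dmask_zero]; decide
  · have h4 : 0 < m / 4 := Nat.pos_of_ne_zero hq
    obtain ⟨q, r, hq4, hr, rfl⟩ : ∃ q r, 0 < q ∧ r < 4 ∧ m = 4 * q + r :=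
      ⟨m / 4, m % 4, h4, Nat.mod_lt _ (by norm_num), by omega⟩
    have IH := fcB_profilePos_eq q hq4
    have hdiv : (4 * q + r) / 4 = q := by omega
    have hmod : (4 * q + r) % 4 = r := by omega
    -- the four presence bits of the mask after appending the lowest digit r
    have hbit : ∀ d, (fcN_dmask (4 * q + r)).testBit d
        = ((fcN_dmask q).testBit d || decide (r = d)) := by
      intro d
      rw [fcN_dmask_pos _ (by omega), hdiv, hmod, Nat.testBit_or,
          show (1:Nat) <<< r = 2 ^ r by simp [Nat.shiftLeft_eq],
          Nat.testBit_two_pow]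
    simp only [hbit]
    -- expand both profiles
    simp only [fcB_profilePos] at IH ⊢
    -- k and M recurrences
    rw [fc_bitLength_quarter (4 * q + r) (by omega), hdiv,
        show (PySem.Int.bitLength (q : Int) + 2 + 1) / 2
           = (PySem.Int.bitLength (q : Int) + 1) / 2 + 1 by omega,
        fc_comb_succ]
    -- chunk decompositions of 4*q+r and (4*q+r) >>> 1
    rw [Nat.shiftRight_one,
        show (4 * q + r) / 2 = 4 * (q / 2) + (2 * (q % 2) + r / 2) by omega,
        show ∀ M : Nat, 4 * M + 1 = 4 * M + (4 * 0 + 1) from fun _ => by norm_num]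
    rw [fc_chunk_land q r _ _ hr (by norm_num),
        fc_chunk_land (q / 2) (2 * (q % 2) + r / 2) _ _ (by omega) (by norm_num),
        Nat.and_one_is_mod, Nat.and_one_is_mod,
        show (2 * (q % 2) + r / 2) % 2 = r / 2 by omega,
        show 4 * 0 + 1 = 1 by norm_num,
        ← Nat.shiftRight_one q]
    have e0 := congrArg (fun t : Bool × Bool × Bool × Bool => t.1) IH
    have e1 := congrArg (fun t : Bool × Bool × Bool × Bool => t.2.1) IH
    have e2 := congrArg (fun t : Bool × Bool × Bool × Bool => t.2.2.1) IH
    have e3 := congrArg (fun t : Bool × Bool × Bool × Bool => t.2.2.2) IH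
    simp only at e0 e1 e2 e3
    interval_cases r <;>
      · rw [fc_chunk_lor _ _ _ _ (by norm_num) (by norm_num),
            fc_chunk_xor _ _ _ _ (by norm_num) (by norm_num),
            fc_chunk_xor _ _ _ _ (by norm_num) (by norm_num),
            fc_chunk_xor _ _ _ _ (by norm_num) (by norm_num),
            fc_chunk_land _ _ _ _ (by norm_num) (by norm_num),
            fc_chunk_land _ _ _ _ (by norm_num) (by norm_num),
            fc_chunk_land _ _ _ _ (by norm_num) (by norm_num)]
        simp only [fc_ne_zero_chunk]
        rw [e0, e1, e2, e3]
        simp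

theorem fcB_profile_eq (n : Int) :
    fcB_profile n = ((fcS_dmask n 0).testBit 0, (fcS_dmask n 0).testBit 1,
                     (fcS_dmask n 0).testBit 2, (fcS_dmask n 0).testBit 3) := by
  unfold fcB_profile
  by_cases h : n ≤ 0
  · rw [if_pos h, fcS_dmask_nonpos _ _ h]; decide
  · rw [if_neg h, fcS_dmask_toNat, fcB_profilePos_eq n.toNat (by omega)]

theorem fc_eq16 (x y : Nat) (hx : x < 16) (hy : y < 16) :
    (x == y) = ((x.testBit 0 == y.testBit 0) && (x.testBit 1 == y.testBit 1)
      && (x.testBit 2 == y.testBit 2) && (x.testBit 3 == y.testBit 3)) := by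
  interval_cases x <;> interval_cases y <;> decide

-- A's result is the equality of the two reference masks
theorem fcA_eq (a b : Int) :
    fourth_compatibility a b = (fcS_dmask a 0 == fcS_dmask b 0) := by
  unfold fourth_compatibility
  rw [fcA_markLoop_eq a (-1) (-1) (-1) (-1), fcA_checkLoop_eq b,
      fc_eq16 _ _ (by rw [fcS_dmask_toNat]; exact fcN_dmask_lt _)
                  (by rw [fcS_dmask_toNat]; exact fcN_dmask_lt _)]
  generalize (fcS_dmask a 0).testBit 0 = p0
  generalize (fcS_dmask a 0).testBit 1 = p1
  generalize (fcS_dmask a 0).testBit 2 = p2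
  generalize (fcS_dmask a 0).testBit 3 = p3
  generalize (fcS_dmask b 0).testBit 0 = q0
  generalize (fcS_dmask b 0).testBit 1 = q1
  generalize (fcS_dmask b 0).testBit 2 = q2
  generalize (fcS_dmask b 0).testBit 3 = q3
  revert p0 p1 p2 p3 q0 q1 q2 q3
  decide


-- ===== VERDICT (by name: the statement is the Claim_ definition above) =====
theorem fourth_compatibility_spec : Claim_equal_fourth_compatibility := by
  intro a b _
  show fourth_compatibility a b = fourth_compatibility_alt a b
  rw [fcA_eq]
  unfold fourth_compatibility_alt
  rw [fcB_profile_eq a, fcB_profile_eq b,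
      fc_eq16 _ _ (by rw [fcS_dmask_toNat]; exact fcN_dmask_lt _)
                  (by rw [fcS_dmask_toNat]; exact fcN_dmask_lt _)]
  generalize (fcS_dmask a 0).testBit 0 = p0
  generalize (fcS_dmask a 0).testBit 1 = p1
  generalize (fcS_dmask a 0).testBit 2 = p2
  generalize (fcS_dmask a 0).testBit 3 = p3
  generalize (fcS_dmask b 0).testBit 0 = q0
  generalize (fcS_dmask b 0).testBit 1 = q1
  generalize (fcS_dmask b 0).testBit 2 = q2
  generalize (fcS_dmask b 0).testBit 3 = q3
  revert p0 p1 p2 p3 q0 q1 q2 q3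
  decide
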